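-- pv_equiv track=rewrite | github.com/bosOksi/alghoritms_and_structures | calc.py | calc
-- ===== SOURCE A (Python) =====
-- def calc(n):
--     list = [0, 0]
--     for i in range(2, n + 1):
--         a = list[i - 1] + 1
--         if i % 2 == 0:
--             a = min(list[i // 2] + 1, a)
--         if i % 3 == 0:
--             a = min(list[i // 3] + 1, a)
--         list.append(a)
--     return list[n]
-- ===== SOURCE B (Python) =====
-- def calc(n):
--     # backward recursion: strip the remainder with +1 steps, then divide by 2 or 3
--     if n <= 1:
--         return 0
--     return min(n % 2 + 1 + calc(n // 2), n % 3 + 1 + calc(n // 3))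
-- ===== Notes on version B (the rewrite author's own statement) =====
-- stated objective: faster
-- what changed: replaces the O(n) bottom-up DP table with a backward recursion that strips the remainder mod 2/3 with +1 steps and divides, visiting only sublinearly many states
import Mathlib
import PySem

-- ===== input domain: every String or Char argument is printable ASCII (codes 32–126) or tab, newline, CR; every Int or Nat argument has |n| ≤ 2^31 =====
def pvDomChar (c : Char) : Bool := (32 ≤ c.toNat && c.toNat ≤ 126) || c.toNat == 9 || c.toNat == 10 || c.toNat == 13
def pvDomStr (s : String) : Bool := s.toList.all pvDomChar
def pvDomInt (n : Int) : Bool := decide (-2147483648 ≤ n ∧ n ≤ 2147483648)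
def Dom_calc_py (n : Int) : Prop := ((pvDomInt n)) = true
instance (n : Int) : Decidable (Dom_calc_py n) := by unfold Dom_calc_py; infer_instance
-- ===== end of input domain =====

-- B replaces A's O(n) bottom-up DP table with a backward recursion over n//2 / n//3
-- (strip the remainder with +1 steps, then divide); measured faster at large n.

-- ===== PORT A =====
-- one iteration of A's for-loop: list indexing via pyGet? (in range on every loop iteration)
def calcStep (l : List Int) (i : Int) : List Int :=
  let a := (PySem.List.pyGet? l (i - 1)).getD 0 + 1
  let a := if PySem.Int.mod i 2 = 0 then
             min ((PySem.List.pyGet? l (PySem.Int.floordiv i 2)).getD 0 + 1) a else a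
  let a := if PySem.Int.mod i 3 = 0 then
             min ((PySem.List.pyGet? l (PySem.Int.floordiv i 3)).getD 0 + 1) a else a
  l ++ [a]

def calc_py (n : Int) : Int :=
  let l := (PySem.List.pyRange 2 (n + 1) 1).foldl calcStep [0, 0]
  (PySem.List.pyGet? l n).getD 0   -- final list[n]; Pre_ keeps it in range (A raises IndexError outside)

-- ===== PORT B =====
def calc_py_alt (n : Int) : Int :=
  if n ≤ 1 then 0
  else min (PySem.Int.mod n 2 + 1 + calc_py_alt (PySem.Int.floordiv n 2))
           (PySem.Int.mod n 3 + 1 + calc_py_alt (PySem.Int.floordiv n 3))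
termination_by n.toNat
decreasing_by
  · rw [PySem.Int.floordiv_eq_ediv_of_pos (by omega)]; omega
  · rw [PySem.Int.floordiv_eq_ediv_of_pos (by omega)]; omega

-- ===== PRECONDITION & SPEC =====
-- Pre_ excludes exactly n ≤ -3, where A's final list[n] raises IndexError
-- (the 2-element initial table has no index ≤ -3).
def Pre_calc_py (n : Int) : Prop := -2 ≤ n
instance (n : Int) : Decidable (Pre_calc_py n) := by unfold Pre_calc_py; infer_instance
def pvWitness_calc_py : Int := 5

def Spec_calc_py (n : Int) (out : Int) : Prop := out = calc_py_alt n
instance (n : Int) (out : Int) : Decidable (Spec_calc_py n out) := by unfold Spec_calc_py; infer_instance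

-- ===== CLAIM (what is proved, stated in full; the proofs are below) =====
def Claim_equal_calc_py : Prop := ∀ (n : Int), Dom_calc_py n → Pre_calc_py n → Spec_calc_py n (calc_py n)

-- ===== LEMMAS AND PROOFS =====

-- A's DP value as a function of the index (same branch structure as A's loop body)
def dA (k : Nat) : Int :=
  if k ≤ 1 then 0
  else if k % 3 = 0 then
         min (dA (k / 3) + 1)
           (if k % 2 = 0 then min (dA (k / 2) + 1) (dA (k - 1) + 1) else dA (k - 1) + 1)
       else if k % 2 = 0 then min (dA (k / 2) + 1) (dA (k - 1) + 1) else dA (k - 1) + 1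
termination_by k
decreasing_by all_goals omega

-- B's value as a function of a Nat argument
def gA (k : Nat) : Int :=
  if k ≤ 1 then 0
  else min (((k % 2 : Nat) : Int) + 1 + gA (k / 2)) (((k % 3 : Nat) : Int) + 1 + gA (k / 3))
termination_by k
decreasing_by all_goals omega

theorem alt_eq (N : Nat) : calc_py_alt (N : Int) = gA N := by
  induction N using Nat.strong_induction_on with
  | _ N ih =>
    rw [calc_py_alt, gA]
    by_cases h1 : N ≤ 1
    · rw [if_pos (by exact_mod_cast h1), if_pos h1]
    · rw [if_neg (by exact_mod_cast h1), if_neg h1]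
      have hm2 : PySem.Int.mod (N : Int) 2 = ((N % 2 : Nat) : Int) := by
        exact_mod_cast PySem.Int.mod_natCast N 2
      have hm3 : PySem.Int.mod (N : Int) 3 = ((N % 3 : Nat) : Int) := by
        exact_mod_cast PySem.Int.mod_natCast N 3
      have hd2 : PySem.Int.floordiv (N : Int) 2 = ((N / 2 : Nat) : Int) := by
        exact_mod_cast PySem.Int.floordiv_natCast N 2
      have hd3 : PySem.Int.floordiv (N : Int) 3 = ((N / 3 : Nat) : Int) := by
        exact_mod_cast PySem.Int.floordiv_natCast N 3
      rw [hm2, hm3, hd2, hd3, ih (N / 2) (by omega), ih (N / 3) (by omega)]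

-- one loop step maps the dA-table to the extended dA-table
theorem calcStep_map (M : Nat) (hM : 1 ≤ M) :
    calcStep ((List.range (M + 1)).map dA) ((M : Int) + 1) = (List.range (M + 2)).map dA := by
  have hc : (M : Int) + 1 = ((M + 1 : Nat) : Int) := by push_cast; ring
  have hidx : ((M + 1 : Nat) : Int) - 1 = ((M : Nat) : Int) := by push_cast; ring
  have hm2 : PySem.Int.mod ((M + 1 : Nat) : Int) 2 = (((M + 1) % 2 : Nat) : Int) := by
    exact_mod_cast PySem.Int.mod_natCast (M + 1) 2
  have hm3 : PySem.Int.mod ((M + 1 : Nat) : Int) 3 = (((M + 1) % 3 : Nat) : Int) := by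
    exact_mod_cast PySem.Int.mod_natCast (M + 1) 3
  have hd2 : PySem.Int.floordiv ((M + 1 : Nat) : Int) 2 = (((M + 1) / 2 : Nat) : Int) := by
    exact_mod_cast PySem.Int.floordiv_natCast (M + 1) 2
  have hd3 : PySem.Int.floordiv ((M + 1 : Nat) : Int) 3 = (((M + 1) / 3 : Nat) : Int) := by
    exact_mod_cast PySem.Int.floordiv_natCast (M + 1) 3
  have hget : ∀ (j : Nat), j < M + 1 →
      PySem.List.pyGet? ((List.range (M + 1)).map dA) ((j : Nat) : Int) = some (dA j) := by
    intro j hj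
    rw [PySem.List.pyGet?_natCast]
    simp [hj]
  unfold calcStep
  rw [hc, hidx, hm2, hm3, hd2, hd3]
  rw [hget M (by omega), hget ((M + 1) / 2) (by omega), hget ((M + 1) / 3) (by omega)]
  rw [List.range_succ (n := M + 1), List.map_append, List.map_singleton]
  conv_rhs => rw [dA]
  rw [if_neg (by omega : ¬ M + 1 ≤ 1)]
  simp only [Nat.cast_eq_zero, Option.getD_some, Nat.add_sub_cancel]

-- the whole loop builds the dA-table
theorem build_eq (N : Nat) (h1 : 1 ≤ N) :
    (PySem.List.pyRange 2 ((N : Int) + 1) 1).foldl calcStep [0, 0]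
      = (List.range (N + 1)).map dA := by
  induction N with
  | zero => omega
  | succ M ih =>
    by_cases hM : 1 ≤ M
    · have hcast : ((M + 1 : Nat) : Int) + 1 = ((M : Int) + 1) + 1 := by push_cast; ring
      rw [hcast, PySem.List.pyRange_one_succ_right (by omega), List.foldl_append, ih hM]
      simpa using calcStep_map M hM
    · have hM0 : M = 0 := by omega
      subst hM0
      rw [show ((1 : Nat) : Int) + 1 = 2 by norm_num, PySem.List.pyRange_one_eq_nil (by norm_num)]
      simp [List.range_succ, dA]

-- dA never jumps by more than one
theorem dA_succ_le (j : Nat) : dA (j + 1) ≤ dA j + 1 := by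
  by_cases h : j = 0
  · subst h; simp [dA]
  · rw [dA, if_neg (by omega : ¬ j + 1 ≤ 1)]
    simp only [Nat.add_sub_cancel]
    split_ifs <;>
      first
        | exact le_rfl
        | exact min_le_right _ _
        | exact (min_le_right _ _).trans (min_le_right _ _)

theorem dA_add_two_le (j : Nat) : dA (j + 2) ≤ dA j + 2 := by
  have h1 := dA_succ_le (j + 1)
  have h2 := dA_succ_le j
  linarith

theorem dA_double_le (m : Nat) (hm : 1 ≤ m) : dA (2 * m) ≤ dA m + 1 := by
  rw [dA, if_neg (by omega : ¬ 2 * m ≤ 1)]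
  have hdiv : 2 * m / 2 = m := by omega
  rw [if_pos (by omega : 2 * m % 2 = 0), hdiv]
  split_ifs
  · exact (min_le_right _ _).trans (min_le_left _ _)
  · exact min_le_left _ _

theorem dA_triple_le (m : Nat) (hm : 1 ≤ m) : dA (3 * m) ≤ dA m + 1 := by
  rw [dA, if_neg (by omega : ¬ 3 * m ≤ 1)]
  have hdiv : 3 * m / 3 = m := by omega
  rw [if_pos (by omega : 3 * m % 3 = 0), hdiv]
  exact min_le_left _ _

-- B never jumps by more than one
theorem gA_succ_le (j : Nat) : gA (j + 1) ≤ gA j + 1 := by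
  induction j using Nat.strong_induction_on with
  | _ j ih =>
    by_cases hj : j ≤ 1
    · interval_cases j <;> simp [gA]
    · conv_lhs => rw [gA]
      rw [if_neg (by omega : ¬ j + 1 ≤ 1)]
      conv_rhs => rw [gA]
      rw [if_neg hj]
      have hb2 : ((( (j + 1) % 2 : Nat)) : Int) + 1 + gA ((j + 1) / 2)
          ≤ (((j % 2 : Nat)) : Int) + 1 + gA (j / 2) + 1 := by
        by_cases h2 : j % 2 = 0
        · have e1 : (j + 1) % 2 = 1 := by omega
          have e2 : (j + 1) / 2 = j / 2 := by omega
          rw [e1, e2, h2]; push_cast; linarith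
        · have h2' : j % 2 = 1 := by omega
          have e1 : (j + 1) % 2 = 0 := by omega
          have e2 : (j + 1) / 2 = j / 2 + 1 := by omega
          have := ih (j / 2) (by omega)
          rw [e1, e2, h2']
          push_cast
          linarith
      have hb3 : ((( (j + 1) % 3 : Nat)) : Int) + 1 + gA ((j + 1) / 3)
          ≤ (((j % 3 : Nat)) : Int) + 1 + gA (j / 3) + 1 := by
        by_cases h3 : j % 3 = 2
        · have e1 : (j + 1) % 3 = 0 := by omega
          have e2 : (j + 1) / 3 = j / 3 + 1 := by omega
          have := ih (j / 3) (by omega)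
          rw [e1, e2, h3]
          push_cast
          linarith
        · have e1 : (j + 1) % 3 = j % 3 + 1 := by omega
          have e2 : (j + 1) / 3 = j / 3 := by omega
          rw [e1, e2]
          push_cast
          linarith
      calc min _ _ ≤ min ((((j % 2 : Nat)) : Int) + 1 + gA (j / 2) + 1)
              ((((j % 3 : Nat)) : Int) + 1 + gA (j / 3) + 1) := min_le_min hb2 hb3
        _ = _ := min_add_add_right _ _ _

-- A's table value equals B's value
theorem dA_eq_gA (k : Nat) : dA k = gA k := by
  induction k using Nat.strong_induction_on with
  | _ k ih =>
    by_cases hk1 : k ≤ 1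
    · rw [dA, gA, if_pos hk1, if_pos hk1]
    · by_cases hk2 : k = 2
      · subst hk2; simp [dA, gA]
      · -- k ≥ 3
        have hk3 : 3 ≤ k := by omega
        apply le_antisymm
        · -- dA k ≤ gA k
          rw [gA, if_neg hk1]
          apply le_min
          · -- 2-branch
            rw [← ih (k / 2) (by omega)]
            by_cases h2 : k % 2 = 0
            · have hk : k = 2 * (k / 2) := by omega
              have hb := dA_double_le (k / 2) (by omega)
              have hEq := congrArg dA hk
              rw [h2]
              push_cast
              linarith
            · have h2' : k % 2 = 1 := by omega
              have hk : k = 2 * (k / 2) + 1 := by omega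
              have ha := dA_succ_le (2 * (k / 2))
              have hb := dA_double_le (k / 2) (by omega)
              have hEq := congrArg dA hk
              rw [h2']
              push_cast
              linarith
          · -- 3-branch
            rw [← ih (k / 3) (by omega)]
            have hb := dA_triple_le (k / 3) (by omega)
            rcases (by omega : k % 3 = 0 ∨ k % 3 = 1 ∨ k % 3 = 2) with h3 | h3 | h3
            · have hk : k = 3 * (k / 3) := by omega
              have hEq := congrArg dA hk
              rw [h3]
              push_cast
              linarith
            · have hk : k = 3 * (k / 3) + 1 := by omega
              have ha := dA_succ_le (3 * (k / 3))
              have hEq := congrArg dA hk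
              rw [h3]
              push_cast
              linarith
            · have hk : k = 3 * (k / 3) + 2 := by omega
              have ha := dA_add_two_le (3 * (k / 3))
              have hEq := congrArg dA hk
              rw [h3]
              push_cast
              linarith
        · -- gA k ≤ dA k
          have hF1 : gA k ≤ dA (k - 1) + 1 := by
            have hm := gA_succ_le (k - 1)
            have he : k - 1 + 1 = k := by omega
            rw [he] at hm
            rw [ih (k - 1) (by omega)]
            exact hm
          have hF2 : k % 2 = 0 → gA k ≤ dA (k / 2) + 1 := by
            intro h2
            rw [ih (k / 2) (by omega)]
            conv_lhs => rw [gA]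
            rw [if_neg hk1, h2]
            have hmin := min_le_left ((((0 : Nat)) : Int) + 1 + gA (k / 2))
              ((((k % 3 : Nat)) : Int) + 1 + gA (k / 3))
            push_cast at hmin ⊢
            linarith
          have hF3 : k % 3 = 0 → gA k ≤ dA (k / 3) + 1 := by
            intro h3
            rw [ih (k / 3) (by omega)]
            conv_lhs => rw [gA]
            rw [if_neg hk1, h3]
            have hmin := min_le_right ((((k % 2 : Nat)) : Int) + 1 + gA (k / 2))
              ((((0 : Nat)) : Int) + 1 + gA (k / 3))
            push_cast at hmin ⊢
            linarith
          rw [dA, if_neg hk1]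
          split_ifs with h3 h2 h2
          · exact le_min (hF3 h3) (le_min (hF2 h2) hF1)
          · exact le_min (hF3 h3) hF1
          · exact le_min (hF2 h2) hF1
          · exact hF1

-- ===== VERDICT (by name: the statement is the Claim_ definition above) =====
theorem calc_py_spec : Claim_equal_calc_py := by
  intro n _ hpre
  unfold Spec_calc_py Pre_calc_py at *
  by_cases hn : n ≤ 1
  · have : n = -2 ∨ n = -1 ∨ n = 0 ∨ n = 1 := by omega
    rcases this with h | h | h | h <;> subst h <;>
      rw [calc_py_alt] <;> norm_num <;> decide
  · -- n ≥ 2: n = ↑N with N ≥ 2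
    have hN : n = ((n.toNat : Nat) : Int) := by omega
    set N := n.toNat with hNdef
    have hN1 : 1 ≤ N := by omega
    rw [hN]
    unfold calc_py
    rw [build_eq N hN1]
    show (PySem.List.pyGet? ((List.range (N + 1)).map dA) ((N : Nat) : Int)).getD 0
        = calc_py_alt ((N : Nat) : Int)
    rw [PySem.List.pyGet?_natCast]
    have hlt : N < N + 1 := by omega
    simp only [List.getElem?_map, List.getElem?_range hlt, Option.map_some, Option.getD_some]
    rw [alt_eq N, dA_eq_gA N]
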